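-- pv_equiv track=rewrite | github.com/Ev1a23/IntroToCS | hw02-Eviatar/hw2_322623182.py | leq
-- ===== SOURCE A (Python) =====
-- def leq(bin1, bin2):
--     '''
--     Return True if bin1<=bin2, False otherwise
--     '''
--     if len(bin1) != len(bin2):
--         if len(bin2) > len(bin1):
--             return True
--         elif len(bin1) > len(bin2):
--             return False
--     for i in range(len(bin1)):
--         b1 = bin1[i]
--         b2 = bin2[i]
--         if(b1 != b2):
--             if b1>b2:
--                 return False
--             elif b2>b1:
--                 return True
--         continue
--
--     return True
-- ===== SOURCE B (Python) =====
-- def leq(bin1, bin2):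
--     if len(bin1) != len(bin2):
--         return len(bin1) < len(bin2)
--     result = True
--     for a, b in zip(reversed(bin1), reversed(bin2)):
--         if a != b:
--             result = a < b
--     return result
-- ===== Notes on version B (the rewrite author's own statement) =====
-- stated objective: alternative
-- what changed: Instead of A's left-to-right index loop with early returns, B (after the length check) makes one right-to-left pass over zip(reversed(bin1), reversed(bin2)) maintaining a running verdict that each differing pair overwrites, so the leftmost difference, processed last, decides; no early exit.
import Mathlib
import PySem

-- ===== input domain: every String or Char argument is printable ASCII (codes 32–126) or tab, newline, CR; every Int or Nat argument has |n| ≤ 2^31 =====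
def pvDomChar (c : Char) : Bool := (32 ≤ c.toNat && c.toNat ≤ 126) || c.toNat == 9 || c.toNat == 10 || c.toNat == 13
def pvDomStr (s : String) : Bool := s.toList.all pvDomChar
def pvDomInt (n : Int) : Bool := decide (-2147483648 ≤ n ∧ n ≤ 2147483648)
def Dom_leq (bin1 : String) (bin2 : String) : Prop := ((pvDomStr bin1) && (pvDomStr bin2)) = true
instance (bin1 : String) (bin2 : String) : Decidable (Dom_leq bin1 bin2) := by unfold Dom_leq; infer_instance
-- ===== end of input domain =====

-- B replaces A's left-to-right early-return scan with a single right-to-left fold over the zipped reversed strings keeping a running verdict (objective: alternative; return value only).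


-- ===== PORT A =====
-- A's for-loop over range(len(bin1)) with early returns, as the obvious structural recursion
def leqLoopA : List Char → List Char → Bool
  | [], _ => true
  | _ :: _, [] => true
  | c1 :: t1, c2 :: t2 =>
    if c1 ≠ c2 then
      if c1 > c2 then false
      else if c2 > c1 then true
      else leqLoopA t1 t2
    else leqLoopA t1 t2

def leq (bin1 : String) (bin2 : String) : Bool :=
  if bin1.toList.length ≠ bin2.toList.length then
    if bin2.toList.length > bin1.toList.length then true
    else false
  else leqLoopA bin1.toList bin2.toList

-- ===== PORT B =====
-- B: if lengths differ, the shorter is smaller; otherwise fold right-to-left over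
-- zip(reversed(bin1), reversed(bin2)) updating a running verdict (the last differing
-- pair processed is the leftmost difference, so it decides).
def leq_alt (bin1 : String) (bin2 : String) : Bool :=
  if bin1.toList.length ≠ bin2.toList.length then
    decide (bin1.toList.length < bin2.toList.length)
  else
    (List.zip bin1.toList.reverse bin2.toList.reverse).foldl
      (fun acc p => if p.1 ≠ p.2 then decide (p.1 < p.2) else acc) true

-- ===== PRECONDITION & SPEC =====
def Spec_leq (bin1 : String) (bin2 : String) (out : Bool) : Prop := out = leq_alt bin1 bin2
instance (bin1 : String) (bin2 : String) (out : Bool) : Decidable (Spec_leq bin1 bin2 out) := by unfold Spec_leq; infer_instance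

-- ===== CLAIM (what is proved, stated in full; the proofs are below) =====
def Claim_equal_leq : Prop := ∀ (bin1 : String) (bin2 : String), Dom_leq bin1 bin2 → Spec_leq bin1 bin2 (leq bin1 bin2)

-- ===== LEMMAS AND PROOFS =====

theorem zip_reverse_eq (l1 l2 : List Char) (h : l1.length = l2.length) :
    l1.reverse.zip l2.reverse = (l1.zip l2).reverse := by
  induction l1 generalizing l2 with
  | nil => cases l2 with
    | nil => rfl
    | cons b t => simp at h
  | cons a s ih =>
    cases l2 with
    | nil => simp at h
    | cons b t =>
      have hl : s.length = t.length := by simpa using h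
      simp only [List.reverse_cons, List.zip_cons_cons]
      rw [List.zip_append (by simpa using hl), ih t hl]
      rfl

theorem leqLoopA_eq_foldr (l1 l2 : List Char) (h : l1.length = l2.length) :
    leqLoopA l1 l2 =
      (l1.zip l2).foldr (fun p acc => if p.1 ≠ p.2 then decide (p.1 < p.2) else acc) true := by
  induction l1 generalizing l2 with
  | nil => cases l2 with
    | nil => rfl
    | cons b t => simp at h
  | cons a s ih =>
    cases l2 with
    | nil => simp at h
    | cons b t =>
      have hl : s.length = t.length := by simpa using h
      simp only [leqLoopA, List.zip_cons_cons, List.foldr_cons]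
      by_cases hab : a = b
      · simp [hab, ih t hl]
      · rcases lt_or_gt_of_ne hab with hlt | hgt
        · simp [hab, hlt, not_lt_of_gt hlt]
        · simp [hab, hgt, not_lt_of_gt hgt]

-- ===== VERDICT (by name: the statement is the Claim_ definition above) =====
theorem leq_spec : Claim_equal_leq := by
  intro bin1 bin2 _
  unfold Spec_leq leq leq_alt
  by_cases h : bin1.toList.length = bin2.toList.length
  · rw [zip_reverse_eq _ _ h, List.foldl_reverse]
    simp only [String.length_toList] at h ⊢
    simp [h, leqLoopA_eq_foldr bin1.toList bin2.toList (by simpa using h)]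
  · simp only [String.length_toList] at h ⊢
    rcases Nat.lt_or_ge bin1.length bin2.length with hlt | hge
    · simp [h, hlt]
    · have hgt : bin2.length < bin1.length :=
        lt_of_le_of_ne hge (fun e => h e.symm)
      simp [h, not_lt_of_gt hgt]
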